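-- pv_equiv track=rewrite | github.com/bakukun/Algorithm_PS | Python3/프로그래머스/2/172927. 광물 캐기/광물 캐기.py | solution
-- ===== SOURCE A (Python) =====
-- def solution(picks, minerals):
--
--     max_mineral = sum(picks) * 5
--
--     if (len(minerals) > max_mineral):
--         minerals = minerals[:max_mineral]
--
--     idx = len(minerals)//5 if len(minerals)%5 == 0 else len(minerals)//5+1
--
--     mineral_index = [[0,0,0] for _ in range(idx)]
--
--     for j in range(len(minerals)):
--         if (minerals[j] == 'diamond'):
--             mineral_index[j//5][0] += 1
--         elif (minerals[j] == 'iron'):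
--             mineral_index[j//5][1] += 1
--         elif (minerals[j] == 'stone'):
--             mineral_index[j//5][2] += 1
--
--     mineral_index.sort(key=lambda x: (-x[0], -x[1], -x[2]))
--
--     ans = 0
--
--     for index in range(len(mineral_index)):
--
--         if picks[0] > 0:
--             picks[0] -= 1
--             ans += sum(mineral_index[index])
--
--         elif picks[1] > 0:
--             picks[1] -= 1
--             ans += (mineral_index[index][0] * 5 + mineral_index[index][1] + mineral_index[index][2])
--
--         elif picks[2] > 0:
--             picks[2] -= 1
--             ans += (mineral_index[index][0] * 25 + mineral_index[index][1] * 5+ mineral_index[index][2])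
--
--     return ans
-- ===== SOURCE B (Python) =====
-- def solution(picks, minerals):
--     # NOTE: unlike the original, this implementation does not mutate `picks`;
--     # equivalence is claimed for the return value only.
--     total = sum(picks) * 5
--     ms = minerals if len(minerals) <= total else minerals[:total]
--     chunks = sorted(
--         ((c.count('diamond'), c.count('iron'), c.count('stone'))
--          for c in (ms[i:i + 5] for i in range(0, len(ms), 5))),
--         key=lambda t: (-t[0], -t[1], -t[2]))
--     WEIGHTS = ((1, 1, 1), (5, 1, 1), (25, 5, 1))
--     kinds = []
--     k = 0
--     while k < min(3, len(picks)) and len(kinds) < len(chunks):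
--         kinds.extend([k] * min(max(picks[k], 0), len(chunks) - len(kinds)))
--         k += 1
--     return sum(w[0] * d + w[1] * i + w[2] * s
--                for (d, i, s), w in zip(chunks, (WEIGHTS[j] for j in kinds)))
-- ===== Notes on version B (the rewrite author's own statement) =====
-- stated objective: alternative
-- what changed: B slices the (truncated) mineral list into 5-windows and counts each window by c.count(...) instead of A's index loop incrementing a bucket array, and computes the cost by zipping the sorted count triples with a flat pick-kind sequence using closed-form weight tuples instead of A's stateful if/elif loop that mutates picks in place; B does not mutate picks (return value is equivalent).
import Mathlib
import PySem

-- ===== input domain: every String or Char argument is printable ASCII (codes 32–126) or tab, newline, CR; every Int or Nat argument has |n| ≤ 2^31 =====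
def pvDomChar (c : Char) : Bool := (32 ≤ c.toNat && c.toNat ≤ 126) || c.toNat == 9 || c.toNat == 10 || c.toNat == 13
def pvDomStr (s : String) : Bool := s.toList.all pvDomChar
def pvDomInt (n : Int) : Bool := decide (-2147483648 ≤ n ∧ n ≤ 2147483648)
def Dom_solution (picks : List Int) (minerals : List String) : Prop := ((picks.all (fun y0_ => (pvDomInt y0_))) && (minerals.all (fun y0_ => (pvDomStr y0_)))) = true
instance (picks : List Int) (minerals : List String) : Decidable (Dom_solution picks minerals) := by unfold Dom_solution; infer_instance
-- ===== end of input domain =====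

-- B groups the minerals into 5-windows by slicing and counting, sorts the count
-- triples, and zips them with a flat pick-kind sequence using closed-form weights,
-- instead of A's bucket-increment loop and stateful if/elif loop; A mutates `picks`
-- in place, B does not: the equivalence claimed here is about the return value only.

-- ===== PORT A =====
def solution (picks : List Int) (minerals : List String) : Int :=
  let maxMineral : Int := picks.sum * 5
  let ms := if (minerals.length : Int) > maxMineral then
              PySem.List.slice minerals none (some maxMineral) else minerals
  let idx : Nat := if ms.length % 5 = 0 then ms.length / 5 else ms.length / 5 + 1
  let mi0 : List (Int × Int × Int) := List.replicate idx (0, 0, 0)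
  -- for j in range(len(minerals)): bump component of bucket j//5 (j ≥ 0, so the
  -- Python list index j//5 is the Nat j/5)
  let mi := (PySem.List.pyRange 0 (PySem.List.len ms)).foldl (fun acc j =>
      if PySem.List.pyGetD ms j "" = "diamond" then
        acc.modify (j.toNat / 5) (fun t => (t.1 + 1, t.2.1, t.2.2))
      else if PySem.List.pyGetD ms j "" = "iron" then
        acc.modify (j.toNat / 5) (fun t => (t.1, t.2.1 + 1, t.2.2))
      else if PySem.List.pyGetD ms j "" = "stone" then
        acc.modify (j.toNat / 5) (fun t => (t.1, t.2.1, t.2.2 + 1))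
      else acc) mi0
  -- sort(key=lambda x: (-x[0],-x[1],-x[2])): each count is in 0..5, so the
  -- lexicographic triple key is encoded order-isomorphically as one base-6 Int
  let miS := PySem.List.sorted mi (fun t => -(t.1 * 36 + t.2.1 * 6 + t.2.2)) false
  -- for index in range(len(mineral_index)): state = (current picks list, ans)
  let res := (PySem.List.pyRange 0 (PySem.List.len miS)).foldl
      (fun (st : List Int × Int) index =>
      let t := PySem.List.pyGetD miS index (0, 0, 0)
      if PySem.List.pyGetD st.1 0 0 > 0 then
        (st.1.set 0 (PySem.List.pyGetD st.1 0 0 - 1), st.2 + (t.1 + t.2.1 + t.2.2))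
      else if PySem.List.pyGetD st.1 1 0 > 0 then
        (st.1.set 1 (PySem.List.pyGetD st.1 1 0 - 1), st.2 + (t.1 * 5 + t.2.1 + t.2.2))
      else if PySem.List.pyGetD st.1 2 0 > 0 then
        (st.1.set 2 (PySem.List.pyGetD st.1 2 0 - 1), st.2 + (t.1 * 25 + t.2.1 * 5 + t.2.2))
      else st) (picks, 0)
  res.2

-- ===== PORT B =====
def pvCountTriple (c : List String) : Int × Int × Int :=
  ((c.count "diamond" : Int), (c.count "iron" : Int), (c.count "stone" : Int))

-- while k < min(3, len(picks)) and len(kinds) < len(chunks):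
--   kinds += [k] * min(max(picks[k], 0), len(chunks) - len(kinds))
-- (k only grows and the guard needs k < 3, so the loop runs at most 3 times:
--  structural recursion on a fuel of 3)
def pvKindsGo (picks : List Int) (n : Nat) : Nat → Nat → List Nat → List Nat
  | 0, _, kinds => kinds
  | fuel + 1, k, kinds =>
    if k < min 3 picks.length ∧ kinds.length < n then
      pvKindsGo picks n fuel (k + 1)
        (kinds ++ List.replicate
          (min (max (picks.getD k 0) 0) ((n : Int) - (kinds.length : Int))).toNat k)
    else kinds

def solution_alt (picks : List Int) (minerals : List String) : Int :=
  let total : Int := picks.sum * 5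
  let ms := if (minerals.length : Int) ≤ total then minerals
            else PySem.List.slice minerals none (some total)
  -- same base-6 encoding of the key (-d,-i,-s) as in the port of A
  let chunks := PySem.List.sorted
      ((PySem.List.pyRange 0 (PySem.List.len ms) 5).map
        (fun i => pvCountTriple (PySem.List.slice ms (some i) (some (i + 5)))))
      (fun t => -(t.1 * 36 + t.2.1 * 6 + t.2.2)) false
  let weights : List (Int × Int × Int) := [(1, 1, 1), (5, 1, 1), (25, 5, 1)]
  let kinds := pvKindsGo picks chunks.length 3 0 []
  ((chunks.zip (kinds.map (fun j => weights.getD j (0, 0, 0)))).map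
      (fun p => p.2.1 * p.1.1 + p.2.2.1 * p.1.2.1 + p.2.2.2 * p.1.2.2)).sum

-- ===== PRECONDITION & SPEC =====
-- Pre_ excludes exactly the inputs on which A raises IndexError: those where the
-- assignment loop reaches picks[1] or picks[2] (or picks[0] with picks empty)
-- beyond the end of the picks list.  n is the number of 5-windows after truncation.
def Pre_solution (picks : List Int) (minerals : List String) : Prop :=
  let M : Int := picks.sum * 5
  let ms := if (minerals.length : Int) > M then
              PySem.List.slice minerals none (some M) else minerals
  let n : Nat := (ms.length + 4) / 5
  let a : Nat := (picks.getD 0 0).toNat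
  let b : Nat := (picks.getD 1 0).toNat
  (n = 0 ∨ 1 ≤ picks.length) ∧ (n ≤ a ∨ 2 ≤ picks.length) ∧ (n ≤ a + b ∨ 3 ≤ picks.length)
instance (picks : List Int) (minerals : List String) : Decidable (Pre_solution picks minerals) := by
  unfold Pre_solution; infer_instance

def pvWitness_solution : List Int × List String := ([1, 1, 1], ["diamond", "stone"])

def Spec_solution (picks : List Int) (minerals : List String) (out : Int) : Prop := out = solution_alt picks minerals
instance (picks : List Int) (minerals : List String) (out : Int) : Decidable (Spec_solution picks minerals out) := by unfold Spec_solution; infer_instance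

-- ===== CLAIM (what is proved, stated in full; the proofs are below) =====
def Claim_equal_solution : Prop := ∀ (picks : List Int) (minerals : List String), Dom_solution picks minerals → Pre_solution picks minerals → Spec_solution picks minerals (solution picks minerals)

-- ===== LEMMAS AND PROOFS =====

-- the common per-window count list, head window first
def pvChunks (ms : List String) : List (Int × Int × Int) :=
  if h : ms = [] then [] else pvCountTriple (ms.take 5) :: pvChunks (ms.drop 5)
termination_by ms.length
decreasing_by
  cases ms with
  | nil => exact absurd rfl h
  | cons a t => simp

-- one element folded into the head window's count triple (body of A's first loop)
def pvBump (b : Int × Int × Int) (s : String) : Int × Int × Int :=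
  if s = "diamond" then (b.1 + 1, b.2.1, b.2.2)
  else if s = "iron" then (b.1, b.2.1 + 1, b.2.2)
  else if s = "stone" then (b.1, b.2.1, b.2.2 + 1)
  else b

-- A's first loop body, on an (element, absolute index) pair
def pvStepE (acc : List (Int × Int × Int)) (p : String × Nat) : List (Int × Int × Int) :=
  if p.1 = "diamond" then acc.modify (p.2 / 5) (fun t => (t.1 + 1, t.2.1, t.2.2))
  else if p.1 = "iron" then acc.modify (p.2 / 5) (fun t => (t.1, t.2.1 + 1, t.2.2))
  else if p.1 = "stone" then acc.modify (p.2 / 5) (fun t => (t.1, t.2.1, t.2.2 + 1))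
  else acc

-- A's second loop body, on the current (picks, ans) state and a count triple
def pvStepC (st : List Int × Int) (t : Int × Int × Int) : List Int × Int :=
  if st.1.getD 0 0 > 0 then (st.1.set 0 (st.1.getD 0 0 - 1), st.2 + (t.1 + t.2.1 + t.2.2))
  else if st.1.getD 1 0 > 0 then (st.1.set 1 (st.1.getD 1 0 - 1), st.2 + (t.1 * 5 + t.2.1 + t.2.2))
  else if st.1.getD 2 0 > 0 then (st.1.set 2 (st.1.getD 2 0 - 1), st.2 + (t.1 * 25 + t.2.1 * 5 + t.2.2))
  else st

def pvCap (pk : List Int) (k : Nat) : Nat := (pk.getD k 0).toNat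

-- the full flat kind sequence 0^a 1^b 2^c available from the picks list
def pvFull (pk : List Int) : List Nat :=
  List.replicate (pvCap pk 0) 0 ++ List.replicate (pvCap pk 1) 1 ++ List.replicate (pvCap pk 2) 2

def pvW (j : Nat) : Int × Int × Int :=
  ([(1, 1, 1), (5, 1, 1), (25, 5, 1)] : List (Int × Int × Int)).getD j (0, 0, 0)

def pvZipSum (L : List (Int × Int × Int)) (ks : List Nat) : Int :=
  ((L.zip (ks.map pvW)).map
      (fun p => p.2.1 * p.1.1 + p.2.2.1 * p.1.2.1 + p.2.2.2 * p.1.2.2)).sum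

-- generic: a fold whose every step rewrites the head and keeps the tail
theorem pv_foldl_head {ι α : Type} (P : List ι) (f : List α → ι → List α) (g : α → ι → α)
    (h : ∀ (b : α) (bs : List α) (p : ι), p ∈ P → f (b :: bs) p = g b p :: bs) :
    ∀ (b : α) (bs : List α), P.foldl f (b :: bs) = P.foldl g b :: bs := by
  induction P with
  | nil => intro b bs; rfl
  | cons q P ih =>
      intro b bs
      rw [List.foldl_cons, List.foldl_cons, h b bs q (List.mem_cons_self),
        ih (fun b bs p hp => h b bs p (List.mem_cons_of_mem q hp))]

-- generic: a fold whose every step keeps the head and rewrites the tail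
theorem pv_foldl_tail {ι α : Type} (P : List ι) (f f' : List α → ι → List α) (x : α)
    (h : ∀ (bs : List α) (p : ι), p ∈ P → f (x :: bs) p = x :: f' bs p) :
    ∀ (bs : List α), P.foldl f (x :: bs) = x :: P.foldl f' bs := by
  induction P with
  | nil => intro bs; rfl
  | cons q P ih =>
      intro bs
      rw [List.foldl_cons, List.foldl_cons, h bs q (List.mem_cons_self),
        ih (fun bs p hp => h bs p (List.mem_cons_of_mem q hp))]

theorem pv_zipIdx_add {α : Type} (l : List α) (k : Nat) :
    l.zipIdx k = l.zipIdx.map (fun p => (p.1, p.2 + k)) := by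
  induction k with
  | zero => simp
  | succ k ih =>
      have : k + 1 = k + 1 := rfl
      rw [show k + 1 = (k) + 1 from rfl, List.zipIdx_succ, ih, List.map_map]
      apply List.map_congr_left
      intro p _
      rfl

theorem pv_bump_count (c : List String) : ∀ (b : Int × Int × Int),
    c.foldl pvBump b =
      (b.1 + (c.count "diamond" : Int), b.2.1 + (c.count "iron" : Int),
        b.2.2 + (c.count "stone" : Int)) := by
  induction c with
  | nil => intro b; simp
  | cons s c ih =>
      intro b
      rw [List.foldl_cons, ih]
      by_cases h1 : s = "diamond"
      · simp [pvBump, h1, List.count_cons, Prod.ext_iff]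
        omega
      · by_cases h2 : s = "iron"
        · simp [pvBump, h1, h2, List.count_cons, Prod.ext_iff, Ne.symm h1]
          omega
        · by_cases h3 : s = "stone"
          · simp [pvBump, h1, h2, h3, List.count_cons, Prod.ext_iff, Ne.symm h1, Ne.symm h2]
            omega
          · simp [pvBump, h1, h2, h3, List.count_cons, Ne.symm h1, Ne.symm h2, Ne.symm h3]

-- a fold over range(len xs) reading xs.getD j is a fold over xs.zipIdx
theorem pv_range_getD_zipIdx {α β : Type} (xs : List α) (d : α) (f : β → α → Nat → β) :
    ∀ (init : β),
    (List.range xs.length).foldl (fun acc j => f acc (xs.getD j d) j) init =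
      xs.zipIdx.foldl (fun acc p => f acc p.1 p.2) init := by
  induction xs using List.reverseRecOn with
  | nil => intro init; rfl
  | append_singleton xs x ih =>
      intro init
      rw [List.length_append, List.length_singleton, List.range_succ, List.foldl_append,
        List.zipIdx_append, List.foldl_append]
      have h1 : (List.range xs.length).foldl
          (fun acc j => f acc ((xs ++ [x]).getD j d) j) init =
          (List.range xs.length).foldl (fun acc j => f acc (xs.getD j d) j) init := by
        apply PySem.List.foldl_congr_mem
        intro acc j hj
        rw [List.getD_append _ _ _ _ (List.mem_range.mp hj)]
      rw [h1, ih]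
      simp [List.getD_append_right]

theorem pv_countA_eq_chunks : ∀ (n : Nat) (ms : List String), ms.length ≤ n →
    ms.zipIdx.foldl pvStepE (List.replicate ((ms.length + 4) / 5) (0, 0, 0)) = pvChunks ms := by
  intro n
  induction n with
  | zero =>
      intro ms h
      have hms : ms = [] := List.eq_nil_of_length_eq_zero (Nat.le_zero.mp h)
      subst hms
      rw [pvChunks]
      simp
  | succ n ih =>
      intro ms h
      by_cases hms : ms = []
      · subst hms
        rw [pvChunks]
        simp
      · have hlen : 0 < ms.length := List.length_pos_iff.mpr hms
        have hzip : ms.zipIdx = (ms.take 5).zipIdx ++ (ms.drop 5).zipIdx (ms.take 5).length := by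
          conv_lhs => rw [← List.take_append_drop 5 ms]
          rw [List.zipIdx_append]
          simp
        have hceil : (ms.length + 4) / 5 = ((ms.drop 5).length + 4) / 5 + 1 := by
          rw [List.length_drop]; omega
        have hh : ∀ (b : Int × Int × Int) (bs : List (Int × Int × Int)) (p : String × Nat),
            p ∈ (ms.take 5).zipIdx → pvStepE (b :: bs) p = pvBump b p.1 :: bs := by
          intro b bs p hp
          have hplt : p.2 < 5 := by
            obtain ⟨_, h2, _⟩ := List.mem_zipIdx (x := p.1) (i := p.2) (by simpa using hp)
            have := List.length_take_le 5 ms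
            omega
          have h0 : p.2 / 5 = 0 := Nat.div_eq_of_lt hplt
          unfold pvStepE pvBump
          rw [h0]
          split_ifs <;> simp
        have hhead : (ms.take 5).zipIdx.foldl (fun b p => pvBump b p.1) (0, 0, 0)
            = pvCountTriple (ms.take 5) := by
          have : (ms.take 5).zipIdx.foldl (fun b p => pvBump b p.1) (0, 0, 0)
              = ((ms.take 5).zipIdx.map Prod.fst).foldl pvBump (0, 0, 0) := by
            rw [List.foldl_map]
          rw [this, List.zipIdx_map_fst, pv_bump_count]
          simp [pvCountTriple]
        rw [hzip, List.foldl_append, hceil, List.replicate_succ,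
          pv_foldl_head _ _ _ hh, hhead]
        rw [pvChunks]
        simp only [hms, dite_false]
        by_cases h5 : ms.length ≤ 5
        · have hr : ms.drop 5 = [] := by
            apply List.eq_nil_of_length_eq_zero
            rw [List.length_drop]; omega
          rw [hr]
          rw [pvChunks]
          simp
        · have hc5 : (ms.take 5).length = 5 := by rw [List.length_take]; omega
          rw [hc5, pv_zipIdx_add (ms.drop 5) 5, List.foldl_map]
          have ht : ∀ (bs : List (Int × Int × Int)) (p : String × Nat),
              p ∈ (ms.drop 5).zipIdx →
              pvStepE (pvCountTriple (ms.take 5) :: bs) (p.1, p.2 + 5)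
                = pvCountTriple (ms.take 5) :: pvStepE bs p := by
            intro bs p _
            have hd : (p.2 + 5) / 5 = p.2 / 5 + 1 := Nat.add_div_right p.2 (by norm_num)
            unfold pvStepE
            simp only [hd]
            split_ifs <;> simp [List.modify_succ_cons]
          rw [pv_foldl_tail _ _ _ _ ht]
          rw [ih (ms.drop 5) (by rw [List.length_drop]; omega)]

theorem pv_chunks_eq_map : ∀ (n : Nat) (ms : List String), ms.length ≤ n →
    pvChunks ms =
      (List.range ((ms.length + 4) / 5)).map
        (fun k => pvCountTriple ((ms.drop (5 * k)).take 5)) := by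
  intro n
  induction n with
  | zero =>
      intro ms h
      have hms : ms = [] := List.eq_nil_of_length_eq_zero (Nat.le_zero.mp h)
      subst hms
      rw [pvChunks]
      simp
  | succ n ih =>
      intro ms h
      by_cases hms : ms = []
      · subst hms
        rw [pvChunks]
        simp
      · have hlen : 0 < ms.length := List.length_pos_iff.mpr hms
        rw [pvChunks]
        simp only [hms, dite_false]
        have hceil : (ms.length + 4) / 5 = ((ms.drop 5).length + 4) / 5 + 1 := by
          rw [List.length_drop]; omega
        rw [hceil, List.range_succ_eq_map, List.map_cons]
        have hdrop : (ms.drop 5).length ≤ n := by rw [List.length_drop]; omega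
        rw [ih (ms.drop 5) hdrop]
        refine congrArg₂ _ (by simp) ?_
        rw [List.map_map]
        apply List.map_congr_left
        intro k _
        simp only [Function.comp]
        rw [List.drop_drop]
        have h5 : List.drop (5 + 5 * k) ms = List.drop (5 * Nat.succ k) ms := by
          congr 1
          omega
        rw [h5]

theorem pv_zip_take {α β : Type} : ∀ (L : List α) (ks : List β),
    L.zip ks = L.zip (ks.take L.length) := by
  intro L
  induction L with
  | nil => intro ks; simp
  | cons t L ih =>
      intro ks
      cases ks with
      | nil => simp
      | cons j ks => simp [List.zip_cons_cons, ih ks]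

theorem pv_zipSum_take (L : List (Int × Int × Int)) (ks : List Nat) :
    pvZipSum L ks = pvZipSum L (ks.take L.length) := by
  unfold pvZipSum
  rw [List.map_take, ← pv_zip_take]

theorem pv_zipSum_prefix (L : List (Int × Int × Int)) (ks₁ ks₂ : List Nat)
    (hp : ks₁ <+: ks₂) (hn : L.length ≤ ks₁.length) :
    pvZipSum L ks₁ = pvZipSum L ks₂ := by
  obtain ⟨t, rfl⟩ := hp
  rw [pv_zipSum_take L ks₁, pv_zipSum_take L (ks₁ ++ t),
    List.take_append_of_le_length hn]

theorem pv_replicate_prefix {x : Nat} {m k : Nat} (h : m ≤ k) :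
    List.replicate m x <+: List.replicate k x :=
  ⟨List.replicate (k - m) x, by rw [← List.replicate_add]; congr 1; omega⟩

theorem pv_kinds_sum (L : List (Int × Int × Int)) (pk : List Int) :
    pvZipSum L (pvKindsGo pk L.length 3 0 []) = pvZipSum L (pvFull pk) := by
  by_cases hn0 : L.length = 0
  · have hL : L = [] := List.eq_nil_of_length_eq_zero hn0
    subst hL
    simp [pvZipSum]
  have hone : ∀ (k m : Nat), m ≤ L.length →
      (min (max (pk.getD k 0) 0) ((L.length : Int) - (m : Int))).toNat
        = min (pvCap pk k) (L.length - m) := by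
    intro k m hm; unfold pvCap; omega
  have h3 : pvKindsGo pk L.length 3 0 [] =
      if 0 < min 3 pk.length ∧ 0 < L.length then
        pvKindsGo pk L.length 2 1
          (List.replicate
            (min (max (pk.getD 0 0) 0) ((L.length : Int) - ((0 : Nat) : Int))).toNat 0)
      else [] := rfl
  have h2 : ∀ ks : List Nat, pvKindsGo pk L.length 2 1 ks =
      if 1 < min 3 pk.length ∧ ks.length < L.length then
        pvKindsGo pk L.length 1 2
          (ks ++ List.replicate
            (min (max (pk.getD 1 0) 0) ((L.length : Int) - (ks.length : Int))).toNat 1)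
      else ks := fun _ => rfl
  have h1 : ∀ ks : List Nat, pvKindsGo pk L.length 1 2 ks =
      if 2 < min 3 pk.length ∧ ks.length < L.length then
        ks ++ List.replicate
          (min (max (pk.getD 2 0) 0) ((L.length : Int) - (ks.length : Int))).toNat 2
      else ks := fun _ => rfl
  rw [h3]
  split_ifs with hA
  · rw [hone 0 0 (Nat.zero_le _), Nat.sub_zero, h2]
    split_ifs with hB
    · have hlt0 : min (pvCap pk 0) L.length < L.length := by
        have := hB.2
        simpa using this
      have ha : min (pvCap pk 0) L.length = pvCap pk 0 := by omega
      rw [ha] at hB ⊢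
      rw [List.length_replicate, hone 1 (pvCap pk 0) (le_of_lt (by simpa using hB.2)), h1]
      split_ifs with hC
      · have hlt1 : pvCap pk 0 + min (pvCap pk 1) (L.length - pvCap pk 0) < L.length := by
          have := hC.2
          simpa using this
        have hb : min (pvCap pk 1) (L.length - pvCap pk 0) = pvCap pk 1 := by omega
        rw [hb] at hC ⊢
        rw [List.length_append, List.length_replicate, List.length_replicate,
          hone 2 (pvCap pk 0 + pvCap pk 1) (by omega)]
        -- last window block may be cut off at L.length; either way it is a prefix
        -- of pvFull pk that covers all of L
        by_cases hc : pvCap pk 2 ≤ L.length - (pvCap pk 0 + pvCap pk 1)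
        · rw [min_eq_left hc]
          unfold pvFull
          rw [List.append_assoc]
        · apply pv_zipSum_prefix
          · unfold pvFull
            simp only [List.append_assoc]
            exact (List.prefix_append_right_inj _).mpr
              ((List.prefix_append_right_inj _).mpr (pv_replicate_prefix (min_le_left _ _)))
          · simp only [List.length_append, List.length_replicate]
            omega
      · rcases Decidable.not_and_iff_not_or_not.mp hC with hx | hx
        · have hlen2 : pk.length = 2 := by omega
          have hcap2 : pvCap pk 2 = 0 := by
            unfold pvCap
            rw [List.getD_eq_default _ _ (by omega)]
            rfl
          by_cases hbb : pvCap pk 1 ≤ L.length - pvCap pk 0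
          · rw [min_eq_left hbb]
            unfold pvFull
            rw [hcap2]
            simp
          · apply pv_zipSum_prefix
            · unfold pvFull
              exact ((List.prefix_append_right_inj _).mpr
                (pv_replicate_prefix (min_le_left _ _))).trans (List.prefix_append _ _)
            · simp only [List.length_append, List.length_replicate]
              omega
        · apply pv_zipSum_prefix
          · unfold pvFull
            exact ((List.prefix_append_right_inj _).mpr
              (pv_replicate_prefix (min_le_left _ _))).trans (List.prefix_append _ _)
          · simp only [List.length_append, List.length_replicate] at hx ⊢
            omega
    · rcases Decidable.not_and_iff_not_or_not.mp hB with hx | hx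
      · have hlen1 : pk.length = 1 := by omega
        have hcap1 : pvCap pk 1 = 0 := by
          unfold pvCap
          rw [List.getD_eq_default _ _ (by omega)]
          rfl
        have hcap2 : pvCap pk 2 = 0 := by
          unfold pvCap
          rw [List.getD_eq_default _ _ (by omega)]
          rfl
        by_cases haa : pvCap pk 0 ≤ L.length
        · rw [min_eq_left haa]
          unfold pvFull
          rw [hcap1, hcap2]
          simp
        · apply pv_zipSum_prefix
          · unfold pvFull
            exact ((pv_replicate_prefix (min_le_left _ _)).trans
              (List.prefix_append _ _)).trans (List.prefix_append _ _)
          · simp only [List.length_replicate]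
            omega
      · apply pv_zipSum_prefix
        · unfold pvFull
          exact ((pv_replicate_prefix (min_le_left _ _)).trans
            (List.prefix_append _ _)).trans (List.prefix_append _ _)
        · simp only [List.length_replicate] at hx ⊢
          omega
  · have hlen0 : pk.length = 0 := by
      rcases Decidable.not_and_iff_not_or_not.mp hA with hx | hx <;> omega
    have hpk : pk = [] := List.eq_nil_of_length_eq_zero hlen0
    subst hpk
    unfold pvFull pvCap
    simp

theorem pv_zipSum_cons (t : Int × Int × Int) (L : List (Int × Int × Int)) (j : Nat)
    (ks : List Nat) :
    pvZipSum (t :: L) (j :: ks) =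
      ((pvW j).1 * t.1 + (pvW j).2.1 * t.2.1 + (pvW j).2.2 * t.2.2) + pvZipSum L ks := by
  simp [pvZipSum]

theorem pv_zipSum_nil (L : List (Int × Int × Int)) : pvZipSum L [] = 0 := by
  simp [pvZipSum]

theorem pv_getD_set_self (l : List Int) (i : Nat) (v : Int) (h : i < l.length) :
    (l.set i v).getD i 0 = v := by
  rw [List.getD_eq_getElem?_getD, List.getElem?_set_self h]
  rfl

theorem pv_getD_set_ne (l : List Int) (i j : Nat) (v : Int) (h : i ≠ j) :
    (l.set i v).getD j 0 = l.getD j 0 := by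
  rw [List.getD_eq_getElem?_getD, List.getElem?_set_ne h, ← List.getD_eq_getElem?_getD]

theorem pv_cost (L : List (Int × Int × Int)) : ∀ (pk : List Int) (ans : Int),
    (L.foldl pvStepC (pk, ans)).2 = ans + pvZipSum L (pvFull pk) := by
  induction L with
  | nil => intro pk ans; simp [pvZipSum]
  | cons t L ih =>
      intro pk ans
      rw [List.foldl_cons]
      by_cases hp0 : pk.getD 0 0 > 0
      · have hlen0 : 0 < pk.length := by
          by_contra hcon
          rw [List.getD_eq_default _ _ (by omega)] at hp0
          omega
        have hstep : pvStepC (pk, ans) t =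
            (pk.set 0 (pk.getD 0 0 - 1), ans + (t.1 + t.2.1 + t.2.2)) := by
          unfold pvStepC
          rw [if_pos (show (pk, ans).1.getD 0 0 > 0 from hp0)]
        have hfull : pvFull pk = 0 :: pvFull (pk.set 0 (pk.getD 0 0 - 1)) := by
          unfold pvFull pvCap
          rw [pv_getD_set_self _ _ _ hlen0, pv_getD_set_ne _ _ _ _ (by decide),
            pv_getD_set_ne _ _ _ _ (by decide),
            show (pk.getD 0 0).toNat = (pk.getD 0 0 - 1).toNat + 1 from by omega,
            List.replicate_succ]
          simp
        rw [hstep, ih, hfull, pv_zipSum_cons]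
        simp [pvW]
        ring
      · by_cases hp1 : pk.getD 1 0 > 0
        · have hlen1 : 1 < pk.length := by
            by_contra hcon
            rw [List.getD_eq_default _ _ (by omega)] at hp1
            omega
          have hstep : pvStepC (pk, ans) t =
              (pk.set 1 (pk.getD 1 0 - 1), ans + (t.1 * 5 + t.2.1 + t.2.2)) := by
            unfold pvStepC
            rw [if_neg (show ¬(pk, ans).1.getD 0 0 > 0 from hp0),
              if_pos (show (pk, ans).1.getD 1 0 > 0 from hp1)]
          have hc0 : (pk.getD 0 0).toNat = 0 := by omega
          have hfull : pvFull pk = 1 :: pvFull (pk.set 1 (pk.getD 1 0 - 1)) := by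
            unfold pvFull pvCap
            rw [pv_getD_set_self _ _ _ hlen1, pv_getD_set_ne _ _ _ _ (by decide),
              pv_getD_set_ne _ _ _ _ (by decide), hc0,
              show (pk.getD 1 0).toNat = (pk.getD 1 0 - 1).toNat + 1 from by omega,
              List.replicate_succ]
            simp
          rw [hstep, ih, hfull, pv_zipSum_cons]
          simp [pvW]
          ring
        · by_cases hp2 : pk.getD 2 0 > 0
          · have hlen2 : 2 < pk.length := by
              by_contra hcon
              rw [List.getD_eq_default _ _ (by omega)] at hp2
              omega
            have hstep : pvStepC (pk, ans) t =
                (pk.set 2 (pk.getD 2 0 - 1), ans + (t.1 * 25 + t.2.1 * 5 + t.2.2)) := by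
              unfold pvStepC
              rw [if_neg (show ¬(pk, ans).1.getD 0 0 > 0 from hp0),
                if_neg (show ¬(pk, ans).1.getD 1 0 > 0 from hp1),
                if_pos (show (pk, ans).1.getD 2 0 > 0 from hp2)]
            have hc0 : (pk.getD 0 0).toNat = 0 := by omega
            have hc1 : (pk.getD 1 0).toNat = 0 := by omega
            have hfull : pvFull pk = 2 :: pvFull (pk.set 2 (pk.getD 2 0 - 1)) := by
              unfold pvFull pvCap
              rw [pv_getD_set_self _ _ _ hlen2, pv_getD_set_ne _ _ _ _ (by decide),
                pv_getD_set_ne _ _ _ _ (by decide), hc0, hc1,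
                show (pk.getD 2 0).toNat = (pk.getD 2 0 - 1).toNat + 1 from by omega,
                List.replicate_succ]
              simp
            rw [hstep, ih, hfull, pv_zipSum_cons]
            simp [pvW]
            ring
          · have hstep : pvStepC (pk, ans) t = (pk, ans) := by
              unfold pvStepC
              rw [if_neg (show ¬(pk, ans).1.getD 0 0 > 0 from hp0),
                if_neg (show ¬(pk, ans).1.getD 1 0 > 0 from hp1),
                if_neg (show ¬(pk, ans).1.getD 2 0 > 0 from hp2)]
            have hfull : pvFull pk = [] := by
              unfold pvFull pvCap
              rw [show (pk.getD 0 0).toNat = 0 from by omega,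
                show (pk.getD 1 0).toNat = 0 from by omega,
                show (pk.getD 2 0).toNat = 0 from by omega]
              simp
            rw [hstep, ih, hfull, pv_zipSum_nil, pv_zipSum_nil]

-- port A's counting loop produces the per-window count list
theorem pv_portA_count (ms : List String) :
    (List.foldl
      (fun acc (j : Int) =>
        if PySem.List.pyGetD ms j "" = "diamond" then
          acc.modify (j.toNat / 5) fun t => (t.1 + 1, t.2.1, t.2.2)
        else if PySem.List.pyGetD ms j "" = "iron" then
          acc.modify (j.toNat / 5) fun t => (t.1, t.2.1 + 1, t.2.2)
        else if PySem.List.pyGetD ms j "" = "stone" then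
          acc.modify (j.toNat / 5) fun t => (t.1, t.2.1, t.2.2 + 1)
        else acc)
      (List.replicate (if ms.length % 5 = 0 then ms.length / 5 else ms.length / 5 + 1)
        (0, 0, 0))
      (PySem.List.pyRange 0 ↑ms.length)) = pvChunks ms := by
  have hidx : (if ms.length % 5 = 0 then ms.length / 5 else ms.length / 5 + 1)
      = (ms.length + 4) / 5 := by split_ifs <;> omega
  rw [hidx, PySem.List.pyRange_zero_natCast, List.foldl_map]
  simp only [PySem.List.pyGetD_natCast, Int.toNat_natCast]
  exact (pv_range_getD_zipIdx ms ""
    (fun (acc : List (Int × Int × Int)) (x : String) (j : Nat) =>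
      if x = "diamond" then acc.modify (j / 5) fun t => (t.1 + 1, t.2.1, t.2.2)
      else if x = "iron" then acc.modify (j / 5) fun t => (t.1, t.2.1 + 1, t.2.2)
      else if x = "stone" then acc.modify (j / 5) fun t => (t.1, t.2.1, t.2.2 + 1)
      else acc) _).trans (pv_countA_eq_chunks ms.length ms le_rfl)

-- port B's slice-window comprehension produces the same per-window count list
theorem pv_portB_chunks (ms : List String) :
    (PySem.List.pyRange 0 ↑ms.length 5).map
      (fun i => pvCountTriple (PySem.List.slice ms (some i) (some (i + 5)))) = pvChunks ms := by
  rw [PySem.List.pyRange_of_pos _ _ (by norm_num : (0:Int) < 5), List.map_map]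
  have hcnt : (if (0:Int) < ↑ms.length then (((ms.length:Int) - 0 + 5 - 1) / 5).toNat else 0)
      = (ms.length + 4) / 5 := by split_ifs <;> omega
  rw [hcnt, pv_chunks_eq_map ms.length ms le_rfl]
  apply List.map_congr_left
  intro k _
  simp only [Function.comp]
  have hcast : (0:Int) + 5 * (k:Int) = ((5 * k : Nat) : Int) := by push_cast; ring
  rw [hcast, show ((5 * k : Nat) : Int) + 5 = ((5 * k : Nat) : Int) + ((5:Nat) : Int) from by
    norm_num, PySem.List.slice_natCast_add]

-- port A's assignment loop computes the weighted zip sum of the full kind sequence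
theorem pv_portA_cost (L : List (Int × Int × Int)) (picks : List Int) :
    (List.foldl
      (fun (st : List Int × Int) (index : Int) =>
        if PySem.List.pyGetD st.1 0 0 > 0 then
          (st.1.set 0 (PySem.List.pyGetD st.1 0 0 - 1),
            st.2 + ((PySem.List.pyGetD L index (0, 0, 0)).1 +
              (PySem.List.pyGetD L index (0, 0, 0)).2.1 +
              (PySem.List.pyGetD L index (0, 0, 0)).2.2))
        else if PySem.List.pyGetD st.1 1 0 > 0 then
          (st.1.set 1 (PySem.List.pyGetD st.1 1 0 - 1),
            st.2 + ((PySem.List.pyGetD L index (0, 0, 0)).1 * 5 +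
              (PySem.List.pyGetD L index (0, 0, 0)).2.1 +
              (PySem.List.pyGetD L index (0, 0, 0)).2.2))
        else if PySem.List.pyGetD st.1 2 0 > 0 then
          (st.1.set 2 (PySem.List.pyGetD st.1 2 0 - 1),
            st.2 + ((PySem.List.pyGetD L index (0, 0, 0)).1 * 25 +
              (PySem.List.pyGetD L index (0, 0, 0)).2.1 * 5 +
              (PySem.List.pyGetD L index (0, 0, 0)).2.2))
        else st)
      (picks, 0) (PySem.List.pyRange 0 ↑L.length)).2 = pvZipSum L (pvFull picks) := by
  simp only [PySem.List.pyGetD_ofNat']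
  have h := PySem.List.foldl_pyRange_pyGetD L (0, 0, 0) pvStepC (picks, 0)
    (a := 0) (by norm_num)
  rw [PySem.List.len_eq] at h
  simp only [Int.toNat_zero, List.drop_zero] at h
  exact Eq.trans (congrArg Prod.snd h) (by rw [pv_cost L picks 0, zero_add])

-- ===== VERDICT (by name: the statement is the Claim_ definition above) =====
theorem solution_spec : Claim_equal_solution := by
  intro picks minerals hdom hpre
  unfold Spec_solution solution solution_alt
  simp only [PySem.List.len_eq]
  have hms : (if ((minerals.length : Int)) ≤ picks.sum * 5 then minerals
      else PySem.List.slice minerals none (some (picks.sum * 5)))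
      = (if ((minerals.length : Int)) > picks.sum * 5 then
          PySem.List.slice minerals none (some (picks.sum * 5)) else minerals) := by
    split_ifs <;> first | rfl | omega
  rw [hms]
  rw [pv_portA_count, pv_portB_chunks, pv_portA_cost]
  exact (pv_kinds_sum _ picks).symm
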